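-- pv_equiv track=rewrite | github.com/chj0112/python-for-codingtest | Practice_problems/Q06.py | solution
-- ===== SOURCE A (Python) =====
-- def solution(food_times, k):
--     answer = 0
--     for i in range(k):
--         food_times[answer] -= 1
--         answer = (answer + 1) % len(food_times)
--         for j in range(len(food_times)):
--             if food_times[answer] != 0:
--                 break
--             answer = (answer + 1) % len(food_times)
--         if food_times.count(0) == len(food_times):
--             answer = -2
--             break
--     answer += 1
--     return answer
-- ===== SOURCE B (Python) =====
-- def solution(food_times, k):
--     if k <= 0:
--         return 1
--     head = food_times[0] - 1
--     n = len(food_times)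
--     # eating order after the first second: indices 1..n-1 then 0, nonzero entries only
--     queue = [(i, food_times[i]) for i in range(1, n) if food_times[i] != 0]
--     if head != 0:
--         queue.append((0, head))
--     h = 0
--     steps = k - 1
--     while steps > 0:
--         if h == len(queue):
--             return -1
--         i, v = queue[h]
--         h += 1
--         if v != 1:
--             queue.append((i, v - 1))
--         steps -= 1
--     if h == len(queue):
--         return -1
--     return queue[h][0] + 1
-- ===== Notes on version B (the rewrite author's own statement) =====
-- stated objective: faster
-- what changed: A re-simulates every second over the whole array (zero-skip scan plus a full count(0) pass per second); B builds once the queue of still-nonzero foods in cyclic eating order and consumes it with a moving head index, appending survivors, so each second is O(1) with no per-second array scans.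
import Mathlib
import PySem

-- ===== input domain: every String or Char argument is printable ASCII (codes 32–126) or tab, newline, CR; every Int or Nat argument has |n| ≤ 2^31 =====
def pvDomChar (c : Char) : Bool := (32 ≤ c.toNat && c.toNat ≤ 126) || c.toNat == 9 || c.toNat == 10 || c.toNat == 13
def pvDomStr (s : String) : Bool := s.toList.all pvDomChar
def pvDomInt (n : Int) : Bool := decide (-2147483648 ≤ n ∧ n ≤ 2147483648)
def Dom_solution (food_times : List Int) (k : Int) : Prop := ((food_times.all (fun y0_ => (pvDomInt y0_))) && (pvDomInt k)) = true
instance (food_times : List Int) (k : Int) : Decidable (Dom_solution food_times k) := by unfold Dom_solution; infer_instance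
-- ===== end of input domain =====

-- B replaces A's per-second full-array scans (zero-skip scan and count(0)) by a queue of the
-- still-nonzero foods consumed via a moving head index.  Return-value equivalence only: A mutates
-- food_times in place, B does not.

-- ===== PORT A =====
-- inner 'for j in range(len(food_times))' zero-skipping loop
def skipLoop (ft : List Int) : Nat → Int → Int
  | 0, ans => ans
  | j + 1, ans =>
    if PySem.List.pyGetD ft ans 0 ≠ 0 then ans
    else skipLoop ft j (PySem.Int.mod (ans + 1) (PySem.List.len ft))

-- outer 'for i in range(k)' loop; returns the value of 'answer' before the final '+= 1'
def mainLoop : List Int → Int → Nat → Int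
  | _, ans, 0 => ans
  | ft, ans, i + 1 =>
    let ft' := PySem.List.pySetD ft ans (PySem.List.pyGetD ft ans 0 - 1)
    let a1 := PySem.Int.mod (ans + 1) (PySem.List.len ft')
    let a2 := skipLoop ft' ft'.length a1
    if (PySem.List.count ft' (0 : Int) : Int) = PySem.List.len ft' then (-2 : Int)
    else mainLoop ft' a2 i

def solution (food_times : List Int) (k : Int) : Int :=
  mainLoop food_times 0 k.toNat + 1

-- ===== PORT B =====
-- 'while steps > 0' queue loop with moving head index h; the post-loop empty check is the fuel-0 case
def altLoop : List (Int × Int) → Nat → Nat → Int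
  | q, h, 0 =>
    match q[h]? with
    | none => -1
    | some (i, _) => i + 1
  | q, h, steps + 1 =>
    match q[h]? with
    | none => -1
    | some (i, v) => altLoop (if v ≠ 1 then q ++ [(i, v - 1)] else q) (h + 1) steps

def solution_alt (food_times : List Int) (k : Int) : Int :=
  if k ≤ 0 then 1
  else
    let head := PySem.List.pyGetD food_times 0 0 - 1
    let n := food_times.length
    let queue := (PySem.List.pyRange 1 (n : Int) 1).filterMap (fun i =>
      match PySem.List.pyGet? food_times i with
      | some v => if v ≠ 0 then some (i, v) else none
      | none => none)
    let queue := if head ≠ 0 then queue ++ [((0 : Int), head)] else queue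
    altLoop queue 0 (k - 1).toNat

-- ===== PRECONDITION & SPEC =====
-- Pre_ excludes exactly the inputs where A raises (IndexError: empty list with k ≥ 1)
def Pre_solution (food_times : List Int) (k : Int) : Prop := food_times = [] → k ≤ 0
instance (food_times : List Int) (k : Int) : Decidable (Pre_solution food_times k) := by unfold Pre_solution; infer_instance
def pvWitness_solution : List Int × Int := ([3, 1, 2], 5)

def Spec_solution (food_times : List Int) (k : Int) (out : Int) : Prop := out = solution_alt food_times k
instance (food_times : List Int) (k : Int) (out : Int) : Decidable (Spec_solution food_times k out) := by unfold Spec_solution; infer_instance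

-- ===== CLAIM (what is proved, stated in full; the proofs are below) =====
def Claim_equal_solution : Prop := ∀ (food_times : List Int) (k : Int), Dom_solution food_times k → Pre_solution food_times k → Spec_solution food_times k (solution food_times k)

-- ===== LEMMAS AND PROOFS =====

-- the cyclic index order 'p, p+1, …, n-1, 0, …, p-1'
def rot (n p : Nat) : List Nat := (List.range n).drop p ++ (List.range n).take p

-- rot without its head p
def seg (n p : Nat) : List Nat := (List.range n).drop (p + 1) ++ (List.range n).take p

-- nonzero-entry extractor: the (index, value) pair kept in B's queue
def fnz (ft : List Int) (i : Nat) : Option (Int × Int) :=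
  match ft[i]? with
  | some v => if v ≠ 0 then some ((i : Int), v) else none
  | none => none

-- the still-nonzero foods in cyclic eating order from position p
def cyc (ft : List Int) (p : Nat) : List (Int × Int) := (rot ft.length p).filterMap (fnz ft)

theorem rot_head (n p : Nat) (h : p < n) : rot n p = p :: seg n p := by
  rw [rot, seg, List.drop_eq_getElem_cons (by simpa using h)]; simp
theorem rot_step (n p : Nat) (h : p < n) : rot n ((p + 1) % n) = seg n p ++ [p] := by
  rcases Nat.lt_or_ge (p+1) n with h2 | h2
  · rw [Nat.mod_eq_of_lt h2, rot, seg, List.take_add_one]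
    simp [List.getElem?_range h]
  · have hpn : n = p + 1 := by omega
    subst hpn; rw [Nat.mod_self, rot, seg]; simp [List.range_succ]

theorem length_rot' (n p : Nat) (h : p ≤ n) : (rot n p).length = n := by
  simp [rot]; omega
theorem rot_add (n p d : Nat) (hp : p < n) (hd : d ≤ n) :
    rot n ((p + d) % n) = (rot n p).drop d ++ (rot n p).take d := by
  induction d with
  | zero => simp [Nat.mod_eq_of_lt hp]
  | succ d ih =>
    have hd' : d ≤ n := by omega
    have ihq := ih hd'
    have hq : (p + d) % n < n := Nat.mod_lt _ (by omega)
    have hlen : (rot n p).length = n := length_rot' n p (by omega)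
    have hdlt : d < (rot n p).length := by omega
    have hdrop : (rot n p).drop d = (rot n p)[d] :: (rot n p).drop (d+1) :=
      List.drop_eq_getElem_cons hdlt
    have hhead := rot_head n ((p + d) % n) hq
    rw [ihq, hdrop, List.cons_append] at hhead
    obtain ⟨hq1, hseg⟩ := List.cons_eq_cons.mp hhead
    have hkey : (p + (d+1)) % n = ((p + d) % n + 1) % n := by
      conv_lhs => rw [show p + (d+1) = (p+d) + 1 from by ring]
      simp [Nat.add_mod]
    rw [hkey, rot_step n _ hq, ← hseg, ← hq1, List.take_add_one]
    simp [List.getElem?_eq_getElem hdlt, hseg, hq1]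
    rw [← List.append_assoc, hseg]

theorem skip_spec (ft : List Int) : ∀ (fuel : Nat) (p : Nat) (Z : List Nat) (i : Nat) (rest : List Nat),
    p < ft.length → rot ft.length p = Z ++ i :: rest →
    (∀ j ∈ Z, ft.getD j 0 = 0) → ft.getD i 0 ≠ 0 → Z.length < fuel →
    skipLoop ft fuel (p : Int) = (i : Int) := by
  intro fuel
  induction fuel with
  | zero => intro p Z i rest _ _ _ _ hlen; omega
  | succ f ih =>
    intro p Z i rest hp hrot hZ hi hlen
    have hhead := rot_head ft.length p hp
    simp only [List.getD_eq_getElem?_getD] at hi hZ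
    rw [skipLoop]
    cases Z with
    | nil =>
      rw [hrot] at hhead
      obtain ⟨hip, -⟩ := List.cons_eq_cons.mp hhead.symm
      subst hip
      simp [PySem.List.pyGetD, hi]
    | cons z Z' =>
      rw [hrot, List.cons_append] at hhead
      obtain ⟨hzp, hseg⟩ := List.cons_eq_cons.mp hhead.symm
      subst hzp
      have hz0 : ft[p]?.getD 0 = 0 := hZ p (by simp)
      simp only [PySem.List.pyGetD_natCast, List.getD_eq_getElem?_getD, hz0, ne_eq,
        not_true_eq_false, if_false]
      have hcast : (p : Int) + 1 = ((p + 1 : Nat) : Int) := by push_cast; ring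
      have hmod : PySem.Int.mod ((p : Int) + 1) (PySem.List.len ft) = (((p + 1) % ft.length : Nat) : Int) := by
        rw [hcast, PySem.List.len_eq, PySem.Int.mod_natCast]
      rw [hmod]
      have hq : (p + 1) % ft.length < ft.length := Nat.mod_lt _ (by omega)
      have hrot' : rot ft.length ((p + 1) % ft.length) = Z' ++ i :: (rest ++ [p]) := by
        rw [rot_step ft.length p hp, hseg]
        simp
      refine ih _ Z' i (rest ++ [p]) hq hrot' (fun j hj => ?_) (by simpa [List.getD_eq_getElem?_getD] using hi) (by simpa using hlen)
      simpa [List.getD_eq_getElem?_getD] using hZ j (by simp [hj])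



theorem mem_rot (n p i : Nat) : i ∈ rot n p ↔ i < n := by
  have : (rot n p).Perm (List.range n) := by
    rw [rot]; exact List.perm_append_comm.trans (by rw [List.take_append_drop])
  rw [this.mem_iff, List.mem_range]

theorem nodup_rot (n p : Nat) : (rot n p).Nodup := by
  have : (rot n p).Perm (List.range n) := by
    rw [rot]; exact List.perm_append_comm.trans (by rw [List.take_append_drop])
  exact this.nodup_iff.mpr (List.nodup_range)

theorem fnz_none_iff (ft : List Int) (i : Nat) (h : i < ft.length) :
    fnz ft i = none ↔ ft.getD i 0 = 0 := by
  simp [fnz, List.getD_eq_getElem?_getD, List.getElem?_eq_getElem h]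

theorem fnz_some (ft : List Int) (i : Nat) (h : i < ft.length) (hnz : ft[i] ≠ 0) :
    fnz ft i = some ((i : Int), ft[i]) := by
  simp [fnz, List.getElem?_eq_getElem h, hnz]

theorem skip_cyc (ft : List Int) (p : Nat) (hp : p < ft.length) (x : Int × Int) (xs : List (Int × Int))
    (h : cyc ft p = x :: xs) :
    ∃ i : Nat, i < ft.length ∧ x = ((i : Int), ft.getD i 0) ∧ ft.getD i 0 ≠ 0 ∧
      skipLoop ft ft.length (p : Int) = (i : Int) ∧ cyc ft i = x :: xs := by
  rw [cyc, List.filterMap_eq_cons_iff] at h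
  obtain ⟨Z, i, rest, hrot, hZ, hx, hxs⟩ := h
  have hiltn : i < ft.length := by
    have : i ∈ rot ft.length p := by rw [hrot]; simp
    exact (mem_rot _ _ _).mp this
  have hinz : ft.getD i 0 ≠ 0 ∧ x = ((i : Int), ft.getD i 0) := by
    rw [fnz] at hx
    rcases h2 : ft[i]? with _ | v
    · rw [h2] at hx; simp at hx
    · rw [h2] at hx
      by_cases hv : v = 0
      · simp [hv] at hx
      · simp [hv] at hx
        constructor
        · simp [List.getD_eq_getElem?_getD, h2, hv]
        · simp [List.getD_eq_getElem?_getD, h2, ← hx]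
  have hZ0 : ∀ j ∈ Z, ft.getD j 0 = 0 := by
    intro j hj
    have hjlt : j < ft.length := by
      have : j ∈ rot ft.length p := by rw [hrot]; simp [hj]
      exact (mem_rot _ _ _).mp this
    exact (fnz_none_iff ft j hjlt).mp (hZ j hj)
  have hZlen : Z.length < ft.length := by
    have := congrArg List.length hrot
    rw [length_rot' _ _ (le_of_lt hp)] at this
    simp at this; omega
  have hskip := skip_spec ft ft.length p Z i rest hp hrot hZ0 hinz.1 hZlen
  -- cyc ft i = x :: xs : rot ft.length i = i :: rest ++ Z
  have hq : (p + Z.length) % ft.length < ft.length := Nat.mod_lt _ (by omega)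
  have hrotq := rot_add ft.length p Z.length hp (le_of_lt hZlen)
  rw [hrot, List.drop_left, List.take_left] at hrotq
  have hhead := rot_head ft.length _ hq
  rw [hrotq, List.cons_append] at hhead
  obtain ⟨hiq, -⟩ := List.cons_eq_cons.mp hhead
  have hroti : rot ft.length i = i :: rest ++ Z := by rw [← hiq] at hrotq; exact hrotq
  refine ⟨i, hiltn, hinz.2, hinz.1, hskip, ?_⟩
  rw [cyc, hroti]
  simp only [List.cons_append, List.filterMap_cons, List.filterMap_append, hx]
  have : Z.filterMap (fnz ft) = [] := List.filterMap_eq_nil_iff.mpr hZ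
  rw [this, hxs]
  simp

theorem cyc_head (ft : List Int) (a : Nat) (ha : a < ft.length) (hnz : ft.getD a 0 ≠ 0) :
    cyc ft a = ((a : Int), ft.getD a 0) :: (seg ft.length a).filterMap (fnz ft) := by
  rw [cyc, rot_head _ _ ha, List.filterMap_cons]
  have h2 : ft.getD a 0 = ft[a] := List.getD_eq_getElem _ _ ha
  rw [fnz_some ft a ha (by rw [← h2]; exact hnz), h2]

theorem step_queue (ft : List Int) (a : Nat) (w : Int) (ha : a < ft.length) :
    cyc (ft.set a w) ((a + 1) % ft.length) =
      (seg ft.length a).filterMap (fnz ft) ++ (if w ≠ 0 then [((a : Int), w)] else []) := by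
  have hlen : (ft.set a w).length = ft.length := by simp
  rw [cyc, hlen, rot_step _ _ ha, List.filterMap_append, List.filterMap_cons, List.filterMap_nil]
  have hmem : a ∉ seg ft.length a := by
    have := nodup_rot ft.length a
    rw [rot_head _ _ ha] at this
    exact (List.nodup_cons.mp this).1
  congr 1
  · apply List.filterMap_congr
    intro j hj
    have hja : j ≠ a := fun h => hmem (h ▸ hj)
    rw [fnz, fnz, List.getElem?_set_ne hja.symm]
  · rw [fnz, List.getElem?_set_self ha]
    by_cases hw : w = 0 <;> simp [hw]

theorem all_zero_of_cyc_nil (ft : List Int) (p : Nat) (h : cyc ft p = []) :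
    ∀ x ∈ ft, x = 0 := by
  intro x hx
  obtain ⟨i, hi, rfl⟩ := List.mem_iff_getElem.mp hx
  have hmem : i ∈ rot ft.length p := (mem_rot _ _ _).mpr hi
  have := List.filterMap_eq_nil_iff.mp h i hmem
  rw [fnz, List.getElem?_eq_getElem hi] at this
  by_cases hv : ft[i] = 0
  · exact hv
  · simp [hv] at this

theorem cyc_nil_count (ft : List Int) (p : Nat) (h : cyc ft p = []) :
    (PySem.List.count ft (0 : Int) : Int) = PySem.List.len ft := by
  rw [PySem.List.count_eq, PySem.List.len_eq]
  norm_cast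
  exact List.count_eq_length.mpr (fun b hb => (all_zero_of_cyc_nil ft p h b hb).symm)

theorem cyc_cons_count (ft : List Int) (p : Nat) (x : Int × Int) (xs : List (Int × Int))
    (h : cyc ft p = x :: xs) :
    (PySem.List.count ft (0 : Int) : Int) ≠ PySem.List.len ft := by
  rw [cyc, List.filterMap_eq_cons_iff] at h
  obtain ⟨Z, i, rest, hrot, hZ, hx, hxs⟩ := h
  have hi : i < ft.length := (mem_rot _ _ _).mp (by rw [hrot]; simp)
  have hnz : ft[i] ≠ 0 := by
    intro h0
    rw [fnz, List.getElem?_eq_getElem hi, h0] at hx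
    simp at hx
  rw [PySem.List.count_eq, PySem.List.len_eq]
  intro hc
  have : ∀ b ∈ ft, 0 = b := List.count_eq_length.mp (by exact_mod_cast hc)
  exact hnz (this ft[i] (List.getElem_mem hi)).symm



theorem altLoop_nil (q : List (Int × Int)) (h : Nat) (hq : q.drop h = []) :
    ∀ s, altLoop q h s = -1 := by
  intro s
  have hnone : q[h]? = none := by
    rw [List.getElem?_eq_none_iff]
    have := List.drop_eq_nil_iff.mp hq
    omega
  cases s <;> rw [altLoop] <;> rw [hnone]

theorem post_eat : ∀ (s : Nat) (ft' : List Int) (p : Nat) (q : List (Int × Int)) (h : Nat),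
    p < ft'.length → q.drop h = cyc ft' p →
    (if (PySem.List.count ft' (0 : Int) : Int) = PySem.List.len ft' then (-2 : Int)
     else mainLoop ft' (skipLoop ft' ft'.length (p : Int)) s) + 1 = altLoop q h s := by
  intro s
  induction s with
  | zero =>
    intro ft' p q h hp hq
    rcases hc : cyc ft' p with _ | ⟨x, xs⟩
    · rw [if_pos (cyc_nil_count ft' p hc), altLoop_nil q h (by rw [hq, hc])]
      norm_num
    · rw [if_neg (cyc_cons_count ft' p x xs hc)]
      obtain ⟨i, hi, hx, hnz, hskip, hcyc⟩ := skip_cyc ft' p hp x xs hc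
      rw [hskip, mainLoop, altLoop]
      have hqh : q[h]? = some x := by
        have : (q.drop h)[0]? = some x := by rw [hq, hc]; rfl
        rwa [List.getElem?_drop, Nat.add_zero] at this
      rw [hqh, hx]
  | succ s ih =>
    intro ft' p q h hp hq
    rcases hc : cyc ft' p with _ | ⟨x, xs⟩
    · rw [if_pos (cyc_nil_count ft' p hc), altLoop_nil q h (by rw [hq, hc])]
      norm_num
    · rw [if_neg (cyc_cons_count ft' p x xs hc)]
      obtain ⟨i, hi, hx, hnz, hskip, hcyc⟩ := skip_cyc ft' p hp x xs hc
      rw [hskip, mainLoop, altLoop]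
      have hqh : q[h]? = some x := by
        have : (q.drop h)[0]? = some x := by rw [hq, hc]; rfl
        rwa [List.getElem?_drop, Nat.add_zero] at this
      rw [hqh, hx]
      set v := ft'.getD i 0 with hv
      set ft'' := PySem.List.pySetD ft' (i : Int) (PySem.List.pyGetD ft' (i : Int) 0 - 1) with hft''
      have hft''eq : ft'' = ft'.set i (v - 1) := by
        rw [hft'', PySem.List.pySetD_natCast, PySem.List.pyGetD_natCast]
      have hlen'' : ft''.length = ft'.length := by rw [hft''eq]; simp
      have hmod : PySem.Int.mod ((i : Int) + 1) (PySem.List.len ft'') =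
          (((i + 1) % ft''.length : Nat) : Int) := by
        rw [show ((i : Int) + 1) = ((i + 1 : Nat) : Int) from by push_cast; ring,
          PySem.List.len_eq, PySem.Int.mod_natCast]
      rw [hmod]
      have hhlt : h < q.length := by
        by_contra hcon
        have : q.drop h = [] := List.drop_eq_nil_iff.mpr (by omega)
        rw [hq, hc] at this
        simp at this
      have hxs' : q.drop (h + 1) = xs := by
        rw [← List.tail_drop, hq, hc]
        rfl
      have hsegxs : (seg ft'.length i).filterMap (fnz ft') = xs := by
        have := cyc_head ft' i hi hnz
        rw [hcyc] at this
        exact (List.cons_eq_cons.mp this.symm).2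
      have hq'' : (if v ≠ 1 then q ++ [((i : Int), v - 1)] else q).drop (h + 1) =
          cyc ft'' ((i + 1) % ft''.length) := by
        rw [hft''eq]
        simp only [List.length_set]
        rw [step_queue ft' i (v - 1) hi, hsegxs]
        by_cases hv1 : v = 1
        · simp [hv1, hxs']
        · have hne : v - 1 ≠ 0 := fun hh => hv1 (by omega)
          rw [if_pos hv1, if_pos hne, List.drop_append_of_le_length (by omega), hxs']
      have := ih ft'' ((i + 1) % ft''.length) (if v ≠ 1 then q ++ [((i : Int), v - 1)] else q)
        (h + 1) (by rw [hlen'']; exact Nat.mod_lt _ (by omega)) hq''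
      exact this

theorem queue_eq (ft : List Int) (hft : ft ≠ []) :
    ((PySem.List.pyRange 1 (ft.length : Int) 1).filterMap (fun i =>
      match PySem.List.pyGet? ft i with
      | some v => if v ≠ 0 then some (i, v) else none
      | none => none)) = (seg ft.length 0).filterMap (fnz ft) := by
  have hn : 1 ≤ ft.length := List.length_pos_iff.mpr hft
  obtain ⟨m, hm⟩ : ∃ m, ft.length = m + 1 := ⟨ft.length - 1, by omega⟩
  rw [PySem.List.pyRange_one]
  have h1 : ((ft.length : Int) - 1).toNat = m := by omega
  rw [h1, seg]
  have h2 : (List.range ft.length).drop (0 + 1) ++ (List.range ft.length).take 0 =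
      (List.range m).map Nat.succ := by
    rw [hm, List.range_succ_eq_map]
    simp
  rw [h2, List.filterMap_map, List.filterMap_map]
  apply List.filterMap_congr
  intro k hk
  have hcast : (1 : Int) + (k : Int) = ((k + 1 : Nat) : Int) := by push_cast; ring
  simp only [Function.comp, hcast, PySem.List.pyGet?_natCast, fnz, Nat.succ_eq_add_one]

theorem solution_spec_aux (ft : List Int) (k : Int) (hpre : ft = [] → k ≤ 0) :
    solution ft k = solution_alt ft k := by
  by_cases hk : k ≤ 0
  · rw [solution, solution_alt, if_pos hk]
    have : k.toNat = 0 := by omega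
    rw [this, mainLoop]
    norm_num
  · rw [solution, solution_alt, if_neg hk]
    have hft : ft ≠ [] := fun h => hk (hpre h)
    have hn : 0 < ft.length := List.length_pos_iff.mpr hft
    have hkt : k.toNat = (k - 1).toNat + 1 := by omega
    rw [hkt, mainLoop]
    set w := PySem.List.pyGetD ft 0 0 - 1 with hw
    set ft' := PySem.List.pySetD ft 0 (PySem.List.pyGetD ft 0 0 - 1) with hft'
    have hft'eq : ft' = ft.set 0 w := by
      rw [hft', hw, PySem.List.pySetD_of_nonneg ft _ (le_refl (0 : Int))]
      norm_num
    have hlen' : ft'.length = ft.length := by rw [hft'eq]; simp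
    have hmod : PySem.Int.mod ((0 : Int) + 1) (PySem.List.len ft') =
        (((1 % ft'.length : Nat)) : Int) := by
      rw [show ((0 : Int) + 1) = ((1 : Nat) : Int) from by norm_num,
        PySem.List.len_eq, PySem.Int.mod_natCast]
    rw [hmod]
    have hw' : w = ft.getD 0 0 - 1 := by
      rw [hw, PySem.List.pyGetD_zero]
    have hq : (if w ≠ 0 then ((PySem.List.pyRange 1 (ft.length : Int) 1).filterMap (fun i =>
        match PySem.List.pyGet? ft i with
        | some v => if v ≠ 0 then some (i, v) else none
        | none => none)) ++ [((0 : Int), w)] else ((PySem.List.pyRange 1 (ft.length : Int) 1).filterMap (fun i =>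
        match PySem.List.pyGet? ft i with
        | some v => if v ≠ 0 then some (i, v) else none
        | none => none))).drop 0 = cyc ft' (1 % ft'.length) := by
      rw [List.drop_zero, hft'eq]
      simp only [List.length_set]
      have := step_queue ft 0 w hn
      rw [Nat.zero_add] at this
      rw [this, queue_eq ft hft]
      by_cases hw0 : w = 0
      · simp [hw0]
      · rw [if_pos hw0, if_pos hw0]
        norm_num
    exact post_eat ((k - 1).toNat) ft' (1 % ft'.length) _ 0
      (by rw [hlen']; exact Nat.mod_lt _ hn) hq

-- ===== VERDICT (by name: the statement is the Claim_ definition above) =====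
theorem solution_spec : Claim_equal_solution := by
  intro food_times k _ hpre
  unfold Spec_solution
  exact solution_spec_aux food_times k hpre
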